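-- pv_equiv track=rewrite | github.com/medashabari/60_days_PrePlacementTraining | Data Structures PPT/2D-Arrays/coding_python/min_degree_array.py | min_size_max_degree_arr
-- ===== SOURCE A (Python) =====
-- def min_size_max_degree_arr(nums):
--     left={}
--     right={}
--     freq={}
--
--     for i in range(len(nums)):
--         if nums[i] not in left:
--             left[nums[i]]=i
--
--         right[nums[i]]=i
--         freq[nums[i]] = freq.get(nums[i],0)+1
--
--         ans=len(nums)
--         max_len = max(freq.values())
--
--     for key,value in freq.items():
--         if value == max_len:
--             ans = min(ans,abs(left[key]-right[key])+1)
--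
--     return ans
-- ===== SOURCE B (Python) =====
-- def min_size_max_degree_arr(nums):
--     first = {}
--     count = {}
--     degree = 0
--     for i, x in enumerate(nums):
--         if x not in first:
--             first[x] = i
--         c = count.get(x, 0) + 1
--         count[x] = c
--         if c > degree:
--             degree = c
--             ans = i - first[x] + 1
--         elif c == degree:
--             ans = min(ans, i - first[x] + 1)
--     return ans
-- ===== Notes on version B (the rewrite author's own statement) =====
-- stated objective: faster
-- what changed: replaces A's three-dict build (recomputing max(freq.values()) on every iteration) plus a second pass over all keys by a single pass that maintains the running degree and the minimal window incrementally
import Mathlib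
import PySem

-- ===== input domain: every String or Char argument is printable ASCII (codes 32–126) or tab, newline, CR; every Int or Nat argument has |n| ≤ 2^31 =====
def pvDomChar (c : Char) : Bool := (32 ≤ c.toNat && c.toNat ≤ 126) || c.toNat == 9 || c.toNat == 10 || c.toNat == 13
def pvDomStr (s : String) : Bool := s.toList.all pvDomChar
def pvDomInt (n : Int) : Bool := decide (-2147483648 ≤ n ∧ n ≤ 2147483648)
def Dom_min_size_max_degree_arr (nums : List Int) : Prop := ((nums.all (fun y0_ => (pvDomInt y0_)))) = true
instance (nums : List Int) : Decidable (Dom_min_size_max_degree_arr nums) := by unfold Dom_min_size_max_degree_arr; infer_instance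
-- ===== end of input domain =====

-- B replaces A's three-dict build (which recomputes max(freq.values()) every iteration) and second pass
-- by a single pass maintaining the running degree and minimal window (objective: faster).

-- ===== PORT A =====
-- one iteration of A's first loop; state = (left, right, freq, ans, max_len), p = (i, nums[i]).
-- `max(freq.values())` is ported as `(max? …).getD 0`: inside the loop freq is never empty, so
-- Python's max never raises there and the default is never taken.
def pvStepA (N : Int) (s : PySem.Dict Int Int × PySem.Dict Int Int × PySem.Dict Int Int × Int × Int)
    (p : Int × Int) : PySem.Dict Int Int × PySem.Dict Int Int × PySem.Dict Int Int × Int × Int :=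
  let left := if s.1.contains p.2 then s.1 else s.1.insert p.2 p.1
  let right := s.2.1.insert p.2 p.1
  let freq := s.2.2.1.insert p.2 (s.2.2.1.getD p.2 0 + 1)
  (left, right, freq, N, (PySem.List.max? freq.values (fun v => v)).getD 0)

def min_size_max_degree_arr (nums : List Int) : Int :=
  -- for i in range(len(nums)): …   (nums[i] is in range, so pyGetD's default is never taken)
  let st := (PySem.List.pyRange 0 (nums.length : Int) 1).foldl
      (fun s i => pvStepA (nums.length : Int) s (i, PySem.List.pyGetD nums i 0))
      (PySem.Dict.empty, PySem.Dict.empty, PySem.Dict.empty, 0, 0)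
  -- for key,value in freq.items(): …   (left[key]/right[key] always present: freq's keys ⊆ theirs)
  st.2.2.1.items.foldl
    (fun ans p => if p.2 == st.2.2.2.2 then min ans (|st.1.getD p.1 0 - st.2.1.getD p.1 0| + 1) else ans)
    st.2.2.2.1

-- ===== PORT B =====
-- one iteration of B's single pass; state = (first, count, degree, ans), p = (i, x).
def pvStepB (s : PySem.Dict Int Int × PySem.Dict Int Int × Int × Int) (p : Int × Int) :
    PySem.Dict Int Int × PySem.Dict Int Int × Int × Int :=
  let first := if s.1.contains p.2 then s.1 else s.1.insert p.2 p.1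
  let c := s.2.1.getD p.2 0 + 1
  let count := s.2.1.insert p.2 c
  if c > s.2.2.1 then (first, count, c, p.1 - first.getD p.2 0 + 1)
  else if c == s.2.2.1 then (first, count, s.2.2.1, min s.2.2.2 (p.1 - first.getD p.2 0 + 1))
  else (first, count, s.2.2.1, s.2.2.2)

def min_size_max_degree_arr_alt (nums : List Int) : Int :=
  ((PySem.List.enumerate nums 0).foldl pvStepB
      (PySem.Dict.empty, PySem.Dict.empty, 0, 0)).2.2.2

-- ===== PRECONDITION & SPEC =====
-- Pre_ excludes only the empty list, on which Python A raises UnboundLocalError (and B does too).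
def Pre_min_size_max_degree_arr (nums : List Int) : Prop := nums ≠ []
instance (nums : List Int) : Decidable (Pre_min_size_max_degree_arr nums) := by
  unfold Pre_min_size_max_degree_arr; infer_instance
def pvWitness_min_size_max_degree_arr : List Int := [1, 2, 2]

def Spec_min_size_max_degree_arr (nums : List Int) (out : Int) : Prop := out = min_size_max_degree_arr_alt nums
instance (nums : List Int) (out : Int) : Decidable (Spec_min_size_max_degree_arr nums out) := by unfold Spec_min_size_max_degree_arr; infer_instance

-- ===== CLAIM (what is proved, stated in full; the proofs are below) =====
def Claim_equal_min_size_max_degree_arr : Prop := ∀ (nums : List Int), Dom_min_size_max_degree_arr nums → Pre_min_size_max_degree_arr nums → Spec_min_size_max_degree_arr nums (min_size_max_degree_arr nums)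

-- ===== LEMMAS AND PROOFS =====

-- first index of x in l (= l.index(x) when x ∈ l)
def fIdx : List Int → Int → Int
  | [], _ => 0
  | a :: t, x => if a = x then 0 else fIdx t x + 1

-- last index of x in l (when x ∈ l)
def lIdx (l : List Int) (x : Int) : Int := (l.length : Int) - 1 - fIdx l.reverse x

-- window length of x in l
def win (l : List Int) (x : Int) : Int := lIdx l x - fIdx l x + 1

theorem fIdx_nonneg (l : List Int) (x : Int) : 0 ≤ fIdx l x := by
  induction l with
  | nil => simp [fIdx]
  | cons a t ih =>
      by_cases h : a = x
      · simp [fIdx, h]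
      · simp [fIdx, h]; omega

theorem fIdx_le_of_mem {l : List Int} {x : Int} (h : x ∈ l) : fIdx l x ≤ (l.length : Int) - 1 := by
  induction l with
  | nil => simp at h
  | cons a t ih =>
      by_cases hax : a = x
      · simp [fIdx, hax]
      · have hx : x ∈ t := (List.mem_cons.mp h).resolve_left (fun he => hax he.symm)
        have := ih hx
        simp only [fIdx, hax, if_false, List.length_cons]
        push_cast
        omega

theorem fIdx_append_left {l : List Int} {x : Int} (r : List Int) (h : x ∈ l) :
    fIdx (l ++ r) x = fIdx l x := by
  induction l with
  | nil => simp at h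
  | cons a t ih =>
      by_cases hax : a = x
      · simp [fIdx, hax]
      · have hx : x ∈ t := (List.mem_cons.mp h).resolve_left (fun he => hax he.symm)
        simp [fIdx, hax, ih hx]

theorem fIdx_append_right {l : List Int} {x : Int} (r : List Int) (h : x ∉ l) :
    fIdx (l ++ r) x = (l.length : Int) + fIdx r x := by
  induction l with
  | nil => simp
  | cons a t ih =>
      have hax : a ≠ x := by rintro rfl; exact h (by simp)
      have hx : x ∉ t := fun hm => h (by simp [hm])
      simp [fIdx, hax, ih hx]
      omega

theorem fIdx_append_self_le (l : List Int) (x : Int) :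
    fIdx (l ++ [x]) x ≤ (l.length : Int) := by
  by_cases h : x ∈ l
  · have := fIdx_le_of_mem h
    rw [fIdx_append_left _ h]
    omega
  · rw [fIdx_append_right _ h]
    simp [fIdx]

theorem lIdx_append_self (l : List Int) (x : Int) : lIdx (l ++ [x]) x = (l.length : Int) := by
  simp [lIdx, fIdx]

theorem lIdx_append_ne {l : List Int} {x y : Int} (hne : y ≠ x) (_hy : y ∈ l) :
    lIdx (l ++ [x]) y = lIdx l y := by
  have hstep : fIdx (x :: l.reverse) y = fIdx l.reverse y + 1 := by
    simp [fIdx, (Ne.symm hne : x ≠ y)]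
  simp only [lIdx, List.reverse_append, List.reverse_singleton, List.singleton_append,
    List.length_append, List.length_singleton, hstep]
  push_cast
  omega

theorem lIdx_le_of_mem {l : List Int} {y : Int} (_hy : y ∈ l) : lIdx l y ≤ (l.length : Int) - 1 := by
  have := fIdx_nonneg l.reverse y
  simp [lIdx]
  omega

theorem fIdx_le_lIdx {l : List Int} {x : Int} (h : x ∈ l) : fIdx l x ≤ lIdx l x := by
  induction l with
  | nil => simp at h
  | cons a t ih =>
      by_cases hax : a = x
      · subst hax
        have h1 : fIdx (t.reverse ++ [a]) a ≤ (t.length : Int) := by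
          simpa using fIdx_append_self_le t.reverse a
        simp only [fIdx, if_pos rfl, lIdx, List.length_cons, List.reverse_cons]
        push_cast
        omega
      · have hx : x ∈ t := (List.mem_cons.mp h).resolve_left (fun he => hax he.symm)
        have h1 := ih hx
        have h2 : fIdx ((a :: t).reverse) x = fIdx t.reverse x := by
          simp only [List.reverse_cons]
          exact fIdx_append_left _ (by simpa using hx)
        simp only [fIdx, hax, if_false, lIdx, List.length_cons, h2] at *
        push_cast at *
        omega

theorem win_le_len {l : List Int} {y : Int} (hy : y ∈ l) : win l y ≤ (l.length : Int) := by
  have := fIdx_nonneg l y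
  have := lIdx_le_of_mem hy
  simp [win]
  omega

theorem win_append_self (l : List Int) (x : Int) :
    win (l ++ [x]) x = (l.length : Int) - fIdx (l ++ [x]) x + 1 := by
  simp [win, lIdx_append_self]

theorem win_append_ne {l : List Int} {x y : Int} (hne : y ≠ x) (hy : y ∈ l) :
    win (l ++ [x]) y = win l y := by
  simp [win, lIdx_append_ne hne hy, fIdx_append_left _ hy]

theorem count_append_singleton (l : List Int) (x y : Int) :
    ((l ++ [x]).count y : Int) = (l.count y : Int) + (if y = x then 1 else 0) := by
  by_cases h : y = x <;>
    simp [h, List.count_append, List.count_cons, List.count_nil] <;> omega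

-- state of B's loop after processing l
def stB (l : List Int) : PySem.Dict Int Int × PySem.Dict Int Int × Int × Int :=
  (PySem.List.enumerate l 0).foldl pvStepB (PySem.Dict.empty, PySem.Dict.empty, 0, 0)

theorem stB_append (t : List Int) (x : Int) :
    stB (t ++ [x]) = pvStepB (stB t) ((t.length : Int), x) := by
  simp [stB, PySem.List.enumerate_append, PySem.List.enumerate_cons, PySem.List.enumerate_nil]

-- full invariant of B's loop state
def InvB (l : List Int) (s : PySem.Dict Int Int × PySem.Dict Int Int × Int × Int) : Prop :=
  (∀ y : Int, s.1.contains y = decide (y ∈ l)) ∧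
  (∀ y ∈ l, s.1.getD y 0 = fIdx l y) ∧
  (∀ y : Int, s.2.1.getD y 0 = (l.count y : Int)) ∧
  (∀ y ∈ l, (l.count y : Int) ≤ s.2.2.1) ∧
  (∀ y ∈ l, (l.count y : Int) = s.2.2.1 → s.2.2.2 ≤ win l y) ∧
  (∃ y ∈ l, (l.count y : Int) = s.2.2.1 ∧ s.2.2.2 = win l y)

-- the conditional first-seen insert maps t-facts to (t ++ [x])-facts
theorem firstDict_step (t : List Int) (x : Int) (d : PySem.Dict Int Int)
    (h1 : ∀ y : Int, d.contains y = decide (y ∈ t))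
    (h2 : ∀ y ∈ t, d.getD y 0 = fIdx t y) :
    (∀ y : Int, (if d.contains x then d else d.insert x (t.length : Int)).contains y
        = decide (y ∈ t ++ [x])) ∧
    (∀ y ∈ t ++ [x], (if d.contains x then d else d.insert x (t.length : Int)).getD y 0
        = fIdx (t ++ [x]) y) := by
  by_cases hxt : x ∈ t
  · rw [h1 x, decide_eq_true hxt]
    constructor
    · intro y
      rw [if_pos rfl, h1 y]
      refine decide_eq_decide.mpr ⟨fun h => List.mem_append.mpr (Or.inl h), fun h => ?_⟩
      rcases List.mem_append.mp h with h | h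
      · exact h
      · simp at h; exact h ▸ hxt
    · intro y hy
      rw [if_pos rfl]
      have hyt : y ∈ t := by
        rcases List.mem_append.mp hy with h | h
        · exact h
        · simp at h; exact h ▸ hxt
      rw [h2 y hyt, fIdx_append_left _ hyt]
  · rw [h1 x, decide_eq_false hxt]
    constructor
    · intro y
      rw [if_neg (by simp), PySem.Dict.contains_insert, h1 y]
      by_cases hyx : y = x
      · simp [hyx]
      · simp [hyx]
    · intro y hy
      rw [if_neg (by simp), PySem.Dict.getD_insert]
      by_cases hyx : y = x
      · subst hyx
        rw [if_pos rfl, fIdx_append_right _ hxt]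
        simp [fIdx]
      · have hyt : y ∈ t := by
          rcases List.mem_append.mp hy with h | h
          · exact h
          · simp at h; exact absurd h hyx
        rw [if_neg hyx, h2 y hyt, fIdx_append_left _ hyt]

theorem countDict_step (t : List Int) (x : Int) (d : PySem.Dict Int Int)
    (h : ∀ y : Int, d.getD y 0 = (t.count y : Int)) :
    ∀ y : Int, (d.insert x (d.getD x 0 + 1)).getD y 0 = ((t ++ [x]).count y : Int) := by
  intro y
  rw [PySem.Dict.getD_insert, count_append_singleton, h x, h y]
  by_cases hyx : y = x <;> simp [hyx]

theorem InvB_mk (l : List Int) (first count : PySem.Dict Int Int) (deg ans : Int)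
    (h1 : ∀ y : Int, first.contains y = decide (y ∈ l))
    (h2 : ∀ y ∈ l, first.getD y 0 = fIdx l y)
    (h3 : ∀ y : Int, count.getD y 0 = (l.count y : Int))
    (h4 : ∀ y ∈ l, (l.count y : Int) ≤ deg)
    (h5 : ∀ y ∈ l, (l.count y : Int) = deg → ans ≤ win l y)
    (h6 : ∃ y ∈ l, (l.count y : Int) = deg ∧ ans = win l y) :
    InvB l (first, count, deg, ans) := ⟨h1, h2, h3, h4, h5, h6⟩

theorem invB (l : List Int) (hne : l ≠ []) : InvB l (stB l) := by
  induction l using List.reverseRecOn with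
  | nil => cases hne rfl
  | append_singleton t x ih =>
    rcases eq_or_ne t [] with rfl | ht
    · -- base case: single element
      refine ⟨?_, ?_, ?_, ?_, ?_, x, by simp, ?_, ?_⟩ <;>
          simp [stB, pvStepB, PySem.List.enumerate_cons, PySem.List.enumerate_nil,
            PySem.Dict.contains_empty, PySem.Dict.getD_empty, PySem.Dict.contains_insert,
            PySem.Dict.getD_insert_self, PySem.Dict.getD_insert, fIdx, win, lIdx] <;>
        intro y <;> rcases eq_or_ne y x with rfl | hyx <;>
        first
        | simp [fIdx, List.count_singleton, hyx, Ne.symm hyx]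
        | simp [fIdx, List.count_singleton]
    · obtain ⟨hc1, hg1, hcnt, hle, hmin, y0, hy0, hy0c, hy0a⟩ := ih ht
      rw [stB_append]
      rcases hs : stB t with ⟨first, ⟨count, ⟨deg, ans⟩⟩⟩
      rw [hs] at hc1 hg1 hcnt hle hmin hy0c hy0a
      simp only at hc1 hg1 hcnt hle hmin hy0c hy0a
      have hdeg1 : 1 ≤ deg := by
        have : 0 < t.count y0 := List.count_pos_iff.mpr hy0
        omega
      have hc0 : count.getD x 0 = (t.count x : Int) := hcnt x
      have hfirst := firstDict_step t x first hc1 hg1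
      have hcount := countDict_step t x count hcnt
      rw [hc0] at hcount
      have hxmem : x ∈ t ++ [x] := List.mem_append.mpr (Or.inr (by simp))
      have hwinx : win (t ++ [x]) x
          = (t.length : Int) - (if first.contains x then first else first.insert x (t.length : Int)).getD x 0 + 1 := by
        rw [hfirst.2 x hxmem, win_append_self]
      have hcntx : ((t ++ [x]).count x : Int) = (t.count x : Int) + 1 := by
        rw [count_append_singleton]; simp
      have hcnty : ∀ y : Int, y ≠ x → ((t ++ [x]).count y : Int) = (t.count y : Int) := by
        intro y hyx; rw [count_append_singleton]; simp [hyx]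
      simp only [pvStepB, hc0]
      set F := if first.contains x then first else first.insert x (t.length : Int) with hF
      split_ifs with hgt heq
      · -- c > deg : new unique maximum
        have hxt : x ∈ t := by
          by_contra hxt
          have : t.count x = 0 := List.count_eq_zero.mpr hxt
          omega
        have hcx : (t.count x : Int) = deg := by have := hle x hxt; omega
        refine InvB_mk _ _ _ _ _ hfirst.1 hfirst.2 hcount ?_ ?_
          ⟨x, hxmem, by rw [hcntx], by rw [hwinx]⟩
        · intro y hy
          by_cases hyx : y = x
          · subst hyx; omega
          · rcases List.mem_append.mp hy with h | h
            · have := hle y h; rw [hcnty y hyx]; omega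
            · simp at h; exact absurd h hyx
        · intro y hy hyc
          by_cases hyx : y = x
          · subst hyx; rw [hwinx]
          · exfalso
            rcases List.mem_append.mp hy with h | h
            · have := hle y h; rw [hcnty y hyx] at hyc; omega
            · simp at h; exact hyx h
      · -- c = deg : x joins the set of maximal elements
        have heq' : (t.count x : Int) + 1 = deg := by simpa using heq
        have hy0x : y0 ≠ x := by
          intro h; rw [h] at hy0c; omega
        refine InvB_mk _ _ _ _ _ hfirst.1 hfirst.2 hcount ?_ ?_ ?_
        · intro y hy
          by_cases hyx : y = x
          · subst hyx; omega
          · rcases List.mem_append.mp hy with h | h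
            · have := hle y h; rw [hcnty y hyx]; omega
            · simp at h; exact absurd h hyx
        · intro y hy hyc
          by_cases hyx : y = x
          · subst hyx; rw [hwinx]
            exact min_le_right _ _
          · have hyt : y ∈ t := by
              rcases List.mem_append.mp hy with h | h
              · exact h
              · simp at h; exact absurd h hyx
            rw [hcnty y hyx] at hyc
            rw [win_append_ne hyx hyt]
            exact le_trans (min_le_left _ _) (hmin y hyt hyc)
        · rcases min_choice ans ((t.length : Int) - (if first.contains x then first else first.insert x (t.length : Int)).getD x 0 + 1) with hm | hm
          · exact ⟨y0, List.mem_append.mpr (Or.inl hy0), by rw [hcnty y0 hy0x]; exact hy0c,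
              by rw [hm, hy0a, win_append_ne hy0x hy0]⟩
          · exact ⟨x, hxmem, by rw [hcntx]; omega, by rw [hm, hwinx]⟩
      · -- c < deg : nothing changes
        have hne' : (t.count x : Int) + 1 ≠ deg := by simpa using heq
        have hlt : (t.count x : Int) + 1 < deg := by omega
        have hy0x : y0 ≠ x := by
          intro h; rw [h] at hy0c; omega
        refine InvB_mk _ _ _ _ _ hfirst.1 hfirst.2 hcount ?_ ?_
          ⟨y0, List.mem_append.mpr (Or.inl hy0), by rw [hcnty y0 hy0x]; exact hy0c,
            by rw [hy0a, win_append_ne hy0x hy0]⟩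
        · intro y hy
          by_cases hyx : y = x
          · subst hyx; rw [hcntx]; omega
          · rcases List.mem_append.mp hy with h | h
            · have := hle y h; rw [hcnty y hyx]; omega
            · simp at h; exact absurd h hyx
        · intro y hy hyc
          by_cases hyx : y = x
          · subst hyx; rw [hcntx] at hyc; omega
          · have hyt : y ∈ t := by
              rcases List.mem_append.mp hy with h | h
              · exact h
              · simp at h; exact absurd h hyx
            rw [hcnty y hyx] at hyc
            rw [win_append_ne hyx hyt]
            exact hmin y hyt hyc

-- state of A's first loop after processing l (with N = len(nums) frozen)
def stA (N : Int) (l : List Int) :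
    PySem.Dict Int Int × PySem.Dict Int Int × PySem.Dict Int Int × Int × Int :=
  (PySem.List.enumerate l 0).foldl (pvStepA N)
    (PySem.Dict.empty, PySem.Dict.empty, PySem.Dict.empty, 0, 0)

theorem stA_append (N : Int) (t : List Int) (x : Int) :
    stA N (t ++ [x]) = pvStepA N (stA N t) ((t.length : Int), x) := by
  simp [stA, PySem.List.enumerate_append, PySem.List.enumerate_cons, PySem.List.enumerate_nil]

-- A's port, rewritten through stA
theorem portA_eq (nums : List Int) :
    min_size_max_degree_arr nums =
      (stA (nums.length : Int) nums).2.2.1.items.foldl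
        (fun ans p => if p.2 == (stA (nums.length : Int) nums).2.2.2.2 then
            min ans (|(stA (nums.length : Int) nums).1.getD p.1 0
              - (stA (nums.length : Int) nums).2.1.getD p.1 0| + 1) else ans)
        (stA (nums.length : Int) nums).2.2.2.1 := by
  have h : PySem.List.enumerate nums 0
      = (PySem.List.pyRange 0 (nums.length : Int) 1).map
          (fun j => (j, PySem.List.pyGetD nums j 0)) := by
    simpa using PySem.List.enumerate_eq_map_pyRange (xs := nums) (d := 0)
  simp only [min_size_max_degree_arr, stA, h, List.foldl_map]

def InvA (N : Int) (l : List Int)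
    (s : PySem.Dict Int Int × PySem.Dict Int Int × PySem.Dict Int Int × Int × Int) : Prop :=
  (∀ y : Int, s.1.contains y = decide (y ∈ l)) ∧
  (∀ y ∈ l, s.1.getD y 0 = fIdx l y) ∧
  (∀ y ∈ l, s.2.1.getD y 0 = lIdx l y) ∧
  (∀ y : Int, s.2.2.1.contains y = decide (y ∈ l)) ∧
  (∀ y : Int, s.2.2.1.getD y 0 = (l.count y : Int)) ∧
  s.2.2.1.keys.Nodup ∧
  s.2.2.2.1 = N

theorem InvA_mk (N : Int) (l : List Int) (left right freq : PySem.Dict Int Int) (ans ml : Int)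
    (h1 : ∀ y : Int, left.contains y = decide (y ∈ l))
    (h2 : ∀ y ∈ l, left.getD y 0 = fIdx l y)
    (h3 : ∀ y ∈ l, right.getD y 0 = lIdx l y)
    (h4 : ∀ y : Int, freq.contains y = decide (y ∈ l))
    (h5 : ∀ y : Int, freq.getD y 0 = (l.count y : Int))
    (h6 : freq.keys.Nodup) (h7 : ans = N) :
    InvA N l (left, right, freq, ans, ml) := ⟨h1, h2, h3, h4, h5, h6, h7⟩

theorem rightDict_step (t : List Int) (x : Int) (d : PySem.Dict Int Int)
    (h : ∀ y ∈ t, d.getD y 0 = lIdx t y) :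
    ∀ y ∈ t ++ [x], (d.insert x (t.length : Int)).getD y 0 = lIdx (t ++ [x]) y := by
  intro y hy
  rw [PySem.Dict.getD_insert]
  by_cases hyx : y = x
  · subst hyx
    rw [if_pos rfl, lIdx_append_self]
  · have hyt : y ∈ t := by
      rcases List.mem_append.mp hy with h' | h'
      · exact h'
      · simp at h'; exact absurd h' hyx
    rw [if_neg hyx, h y hyt, lIdx_append_ne hyx hyt]

theorem invA (N : Int) (l : List Int) (hne : l ≠ []) : InvA N l (stA N l) := by
  induction l using List.reverseRecOn with
  | nil => cases hne rfl
  | append_singleton t x ih =>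
    rcases eq_or_ne t [] with rfl | ht
    · refine ⟨?_, ?_, ?_, ?_, ?_, ?_, rfl⟩ <;>
        first
        | (simp [stA, pvStepA, PySem.List.enumerate_cons, PySem.List.enumerate_nil,
            PySem.Dict.contains_empty, PySem.Dict.getD_empty, PySem.Dict.contains_insert,
            PySem.Dict.getD_insert_self, PySem.Dict.getD_insert, fIdx, lIdx] <;>
           intro y <;> rcases eq_or_ne y x with rfl | hyx <;>
           first
           | simp [fIdx, List.count_singleton, hyx, Ne.symm hyx]
           | simp [fIdx, List.count_singleton])
        | exact PySem.Dict.nodup_keys_insert _ _ _ PySem.Dict.nodup_keys_empty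
    · obtain ⟨hc1, hg1, hr1, hfc, hfg, hnd, hansN⟩ := ih ht
      rw [stA_append]
      rcases hs : stA N t with ⟨left, ⟨right, ⟨freq, ⟨ans, ml⟩⟩⟩⟩
      rw [hs] at hc1 hg1 hr1 hfc hfg hnd hansN
      simp only at hc1 hg1 hr1 hfc hfg hnd hansN
      have hfirst := firstDict_step t x left hc1 hg1
      have hright := rightDict_step t x right hr1
      have hcount := countDict_step t x freq hfg
      simp only [pvStepA]
      refine InvA_mk _ _ _ _ _ _ _ hfirst.1 hfirst.2 hright ?_ hcount ?_ rfl
      · intro y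
        rw [PySem.Dict.contains_insert, hfc y]
        rcases eq_or_ne y x with rfl | hyx
        · simp
        · simp [hyx]
      · exact PySem.Dict.nodup_keys_insert _ _ _ hnd

-- the per-iteration max(freq.values()) at the final state is the maximal multiplicity
theorem ml_spec (N : Int) (l : List Int) (hne : l ≠ []) :
    (∀ y ∈ l, (l.count y : Int) ≤ (stA N l).2.2.2.2) ∧
    (∃ y ∈ l, (l.count y : Int) = (stA N l).2.2.2.2) := by
  obtain ⟨hc1, hg1, hr1, hfc, hfg, hnd, hansN⟩ := invA N l hne
  have hmem : ∀ y : Int, y ∈ (stA N l).2.2.1.keys ↔ y ∈ l := by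
    intro y
    rw [← PySem.Dict.contains_iff_mem_keys, hfc y, decide_eq_true_iff]
  have hml : (stA N l).2.2.2.2
      = (PySem.List.max? ((stA N l).2.2.1).values (fun v => v)).getD 0 := by
    obtain ⟨t, x, rfl⟩ : ∃ t x, l = t ++ [x] := by
      rcases List.eq_nil_or_concat l with rfl | ⟨t, x, h⟩
      · cases hne rfl
      · exact ⟨t, x, by simpa [List.concat_eq_append] using h⟩
    rw [stA_append]
    simp [pvStepA]
  have hv : ((stA N l).2.2.1).values
      = ((stA N l).2.2.1).keys.map (fun k => ((stA N l).2.2.1).getD k 0) :=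
    PySem.Dict.values_eq_map_keys _ hnd 0
  obtain ⟨a, ha⟩ := List.exists_mem_of_ne_nil l hne
  have hkne : (stA N l).2.2.1.keys ≠ [] := by
    intro h
    have := (hmem a).mpr ha
    rw [h] at this; simp at this
  have hvne : ((stA N l).2.2.1).values ≠ [] := by
    rw [hv]
    simpa using hkne
  rcases hmax : PySem.List.max? ((stA N l).2.2.1).values (fun v => v) with _ | m
  · exact absurd ((PySem.List.max?_eq_none_iff _ _).mp hmax) hvne
  · have hmlm : (stA N l).2.2.2.2 = m := by rw [hml, hmax]; rfl
    constructor
    · intro y hy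
      have hyv : ((stA N l).2.2.1).getD y 0 ∈ ((stA N l).2.2.1).values := by
        rw [hv]
        exact List.mem_map.mpr ⟨y, (hmem y).mpr hy, rfl⟩
      have := PySem.List.max?_isMax hmax _ hyv
      rw [hfg y] at hyv
      rw [hmlm, ← hfg y]
      exact this
    · have hm : m ∈ ((stA N l).2.2.1).values := PySem.List.max?_mem hmax
      rw [hv] at hm
      obtain ⟨k, hk, hkm⟩ := List.mem_map.mp hm
      refine ⟨k, (hmem k).mp hk, ?_⟩
      rw [hmlm, ← hkm, hfg k]

-- generic facts about the guarded running-minimum loop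
theorem foldl_min_if_le {α : Type} (p : α → Bool) (w : α → Int) :
    ∀ (L : List α) (a : Int),
      L.foldl (fun ans k => if p k then min ans (w k) else ans) a ≤ a := by
  intro L
  induction L with
  | nil => intro a; simp
  | cons k t ih =>
      intro a
      rw [List.foldl_cons]
      by_cases h : p k
      · rw [if_pos h]
        exact le_trans (ih _) (min_le_left _ _)
      · rw [if_neg h]
        exact ih a

theorem foldl_min_if_le_w {α : Type} (p : α → Bool) (w : α → Int) :
    ∀ (L : List α) (a : Int) (k : α), k ∈ L → p k = true →
      L.foldl (fun ans k => if p k then min ans (w k) else ans) a ≤ w k := by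
  intro L
  induction L with
  | nil => intro a k hk; simp at hk
  | cons k0 t ih =>
      intro a k hk hp
      rw [List.foldl_cons]
      rcases List.mem_cons.mp hk with rfl | hk'
      · rw [if_pos hp]
        exact le_trans (foldl_min_if_le p w t _) (min_le_right _ _)
      · by_cases h : p k0
        · rw [if_pos h]; exact ih _ k hk' hp
        · rw [if_neg h]; exact ih a k hk' hp

theorem foldl_min_if_cases {α : Type} (p : α → Bool) (w : α → Int) :
    ∀ (L : List α) (a : Int),
      L.foldl (fun ans k => if p k then min ans (w k) else ans) a = a ∨
        ∃ k ∈ L, p k = true ∧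
          L.foldl (fun ans k => if p k then min ans (w k) else ans) a = w k := by
  intro L
  induction L with
  | nil => intro a; left; rfl
  | cons k0 t ih =>
      intro a
      rw [List.foldl_cons]
      by_cases h : p k0
      · rw [if_pos h]
        rcases ih (min a (w k0)) with h1 | ⟨k, hk, hp, h1⟩
        · rcases min_choice a (w k0) with hm | hm
          · left; rw [h1, hm]
          · right
            exact ⟨k0, by simp, h, by rw [h1, hm]⟩
        · right
          exact ⟨k, List.mem_cons_of_mem _ hk, hp, h1⟩
      · rw [if_neg h]
        rcases ih a with h1 | ⟨k, hk, hp, h1⟩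
        · left; exact h1
        · right; exact ⟨k, List.mem_cons_of_mem _ hk, hp, h1⟩

-- the central equivalence
theorem AB_eq (nums : List Int) (hne : nums ≠ []) :
    min_size_max_degree_arr nums = min_size_max_degree_arr_alt nums := by
  obtain ⟨hc1, hg1, hr1, hfc, hfg, hnd, hansN⟩ := invA (nums.length : Int) nums hne
  obtain ⟨hml_le, y1, hy1, hy1c⟩ := ml_spec (nums.length : Int) nums hne
  obtain ⟨hBc, hBg, hBcnt, hBle, hBmin, yB, hyB, hyBc, hyBa⟩ := invB nums hne
  have halt : min_size_max_degree_arr_alt nums = (stB nums).2.2.2 := rfl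
  have hmemK : ∀ y : Int, y ∈ (stA (nums.length : Int) nums).2.2.1.keys ↔ y ∈ nums := by
    intro y
    rw [← PySem.Dict.contains_iff_mem_keys, hfc y, decide_eq_true_iff]
  -- window expression of A's inner term
  have hwin : ∀ k ∈ nums,
      |(stA (nums.length : Int) nums).1.getD k 0
        - (stA (nums.length : Int) nums).2.1.getD k 0| + 1 = win nums k := by
    intro k hk
    rw [hg1 k hk, hr1 k hk]
    have h1 := fIdx_le_lIdx hk
    rw [abs_sub_comm, abs_of_nonneg (by omega : (0 : Int) ≤ lIdx nums k - fIdx nums k)]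
    simp [win]
  -- characterize A's answer
  rw [portA_eq, PySem.Dict.items_eq_map_keys _ hnd 0, List.foldl_map]
  set ml := (stA (nums.length : Int) nums).2.2.2.2 with hml
  set deg := (stB nums).2.2.1 with hdeg
  set L := (stA (nums.length : Int) nums).2.2.1.keys with hL
  set p : Int → Bool := fun k => (stA (nums.length : Int) nums).2.2.1.getD k 0 == ml with hp
  set w : Int → Int := fun k =>
      |(stA (nums.length : Int) nums).1.getD k 0
        - (stA (nums.length : Int) nums).2.1.getD k 0| + 1 with hw
  have hbody : (fun (ans : Int) (k : Int) =>
        if ((k, (stA (nums.length : Int) nums).2.2.1.getD k 0).2 == ml)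
        then min ans (|(stA (nums.length : Int) nums).1.getD
              (k, (stA (nums.length : Int) nums).2.2.1.getD k 0).1 0
            - (stA (nums.length : Int) nums).2.1.getD
              (k, (stA (nums.length : Int) nums).2.2.1.getD k 0).1 0| + 1)
        else ans)
      = fun ans k => if p k then min ans (w k) else ans := rfl
  rw [hbody, hansN]
  set r := L.foldl (fun ans k => if p k then min ans (w k) else ans) (nums.length : Int) with hr
  -- P1 : r is below every maximal window
  have hP1 : ∀ k ∈ nums, (nums.count k : Int) = ml → r ≤ win nums k := by
    intro k hk hkc
    have hpk : p k = true := by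
      rw [hp]
      simp only [beq_iff_eq]
      rw [hfg k, hkc]
    have := foldl_min_if_le_w p w L (nums.length : Int) k ((hmemK k).mpr hk) hpk
    rw [hw] at this
    simp only at this
    rw [← hwin k hk]
    exact this
  -- P2 : r is itself a maximal window
  have hP2 : ∃ k ∈ nums, (nums.count k : Int) = ml ∧ r = win nums k := by
    rcases foldl_min_if_cases p w L (nums.length : Int) with h1 | ⟨k, hk, hpk, h1⟩
    · -- r = len nums : then the window of a maximal element equals len nums
      have h2 := hP1 y1 hy1 hy1c
      have h3 := win_le_len hy1
      rw [← hr] at h1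
      exact ⟨y1, hy1, hy1c, by omega⟩
    · have hkl : k ∈ nums := (hmemK k).mp hk
      have hkc : (nums.count k : Int) = ml := by
        rw [hp] at hpk
        simp only [beq_iff_eq] at hpk
        rw [← hfg k]
        exact hpk
      refine ⟨k, hkl, hkc, ?_⟩
      rw [← hr] at h1
      rw [h1, hw]
      exact hwin k hkl
  -- the two maxima agree
  have hmldeg : ml = deg := by
    have h1 : ml ≤ deg := by rw [← hy1c]; exact hBle y1 hy1
    have h2 : deg ≤ ml := by rw [← hyBc]; exact hml_le yB hyB
    omega
  -- antisymmetry of the two minima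
  obtain ⟨kA, hkA, hkAc, hkAr⟩ := hP2
  have h1 : (stB nums).2.2.2 ≤ r := by
    rw [hkAr]
    exact hBmin kA hkA (by rw [hkAc, hmldeg])
  have h2 : r ≤ (stB nums).2.2.2 := by
    rw [hyBa]
    exact hP1 yB hyB (by rw [hyBc, hmldeg])
  rw [halt]
  omega



-- ===== VERDICT (by name: the statement is the Claim_ definition above) =====
theorem min_size_max_degree_arr_spec : Claim_equal_min_size_max_degree_arr := by
  intro nums _ hpre
  unfold Spec_min_size_max_degree_arr
  exact AB_eq nums hpre
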